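-- pv_equiv track=rewrite | github.com/mkierc/advent-of-code | 2024/src/day_21/part_2_v2.py | short_decode
-- ===== SOURCE A (Python) =====
-- from collections import defaultdict, Counter
-- from itertools import product, pairwise
--
-- def short_decode(code_map, short_mapping):
--     """Decode map of pair counts into decoded strings, and back into maps of pair counts:
--
--     {'<A': 1, 'A^': 3, '^A': 1, ... }  ->  'A>>^A' x 1, 'AA' x 3, ...  ->  {'A>': 2, '>>': 1, ... }
--     """
--
--     decoded = defaultdict(int)
--
--     for k, v in code_map.items():
--         mapped = short_mapping[k]  # '<A' -> '>>^'
--         paired = pairwise('A' + mapped + 'A')  # '>>^' -> 'A>>^A' -> ['A>', '>>', '>^', '^A']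
--         for a, b in paired:
--             decoded.update({a + b: decoded[a + b] + v})
--
--     return decoded
-- ===== SOURCE B (Python) =====
-- from collections import defaultdict
--
--
-- def short_decode(code_map, short_mapping):
--     # Precompute, once per mapping entry, the pair-count profile of its padded
--     # decoded string; then combine the profiles linearly, weighted by code_map.
--     profiles = {}
--     for k, s in short_mapping.items():
--         t = 'A' + s + 'A'
--         prof = {}
--         for a, b in zip(t, t[1:]):
--             prof[a + b] = prof.get(a + b, 0) + 1
--         profiles[k] = prof
--
--     decoded = defaultdict(int)
--     for k, v in code_map.items():
--         for pair, n in profiles[k].items():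
--             decoded[pair] += n * v
--     return decoded
-- ===== Notes on version B (the rewrite author's own statement) =====
-- stated objective: alternative
-- what changed: B precomputes a pair-count profile dict per short_mapping entry (an index built from the mapping, not from code_map), then produces the result as a weighted linear combination of those profiles, so the per-entry pairwise character scan of A disappears from the code_map loop.
import Mathlib
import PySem

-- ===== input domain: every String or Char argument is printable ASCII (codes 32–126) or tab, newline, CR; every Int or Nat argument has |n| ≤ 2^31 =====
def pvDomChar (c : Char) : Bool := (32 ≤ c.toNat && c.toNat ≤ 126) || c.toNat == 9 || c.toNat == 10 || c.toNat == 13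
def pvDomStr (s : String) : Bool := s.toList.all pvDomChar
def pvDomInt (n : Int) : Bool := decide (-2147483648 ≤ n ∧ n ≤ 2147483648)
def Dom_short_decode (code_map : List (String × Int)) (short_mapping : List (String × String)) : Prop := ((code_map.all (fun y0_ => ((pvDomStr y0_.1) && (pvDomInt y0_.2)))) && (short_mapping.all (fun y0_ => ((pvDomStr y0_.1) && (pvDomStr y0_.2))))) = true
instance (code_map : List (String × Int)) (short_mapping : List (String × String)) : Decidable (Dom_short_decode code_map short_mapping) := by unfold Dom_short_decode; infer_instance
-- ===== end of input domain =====

-- B precomputes a pair-count profile dict for every short_mapping entry, then builds the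
-- result as a weighted linear combination of those profiles (A instead re-scans the decoded
-- string pairwise for every code_map entry); alternative decomposition, same results.

-- ===== PORT A =====
-- pairwise('A' + s + 'A') with each pair (a, b) rendered as the 2-char string a + b
-- (exact: Python's pairwise over the characters of the concatenated string; B's zip(t, t[1:])
-- over the same characters is the same list, so both ports share this helper).
def pvPairsOf (s : String) : List String :=
  let cs := 'A' :: s.toList ++ ['A']
  (cs.zip cs.tail).map (fun ab => String.ofList [ab.1, ab.2])

-- for k, v in code_map.items(): mapped = short_mapping[k]; for a, b in pairwise(...):
--   decoded.update({a+b: decoded[a+b] + v})  — the defaultdict read+update is d[k] = d.get(k,0) + v = Dict.modify.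
-- short_mapping[k] uses first-match lookup; KeyError (key absent) is excluded by Pre_ (the .getD "" is never reached there).
def short_decode (code_map : List (String × Int)) (short_mapping : List (String × String)) : List (String × Int) :=
  (code_map.foldl
    (fun d kv =>
      let mapped := (List.lookup kv.1 short_mapping).getD ""
      (pvPairsOf mapped).foldl (fun d p => d.modify p 0 (· + kv.2)) d)
    PySem.Dict.empty).items

-- ===== PORT B =====
-- prof[a+b] = prof.get(a+b, 0) + 1 over zip(t, t[1:]) — a pair-count dict for one string
def pvProfile (s : String) : PySem.Dict String Int :=
  (pvPairsOf s).foldl (fun d p => d.modify p 0 (· + 1)) PySem.Dict.empty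

-- profiles[k] = prof (dict assignment = insert); decoded[pair] += n * v over profiles[k].items();
-- profiles[k] (KeyError if absent) is excluded by Pre_, the .getD Dict.empty is never reached there.
def pvProfiles (short_mapping : List (String × String)) : PySem.Dict String (PySem.Dict String Int) :=
  short_mapping.foldl (fun pr kv => pr.insert kv.1 (pvProfile kv.2)) PySem.Dict.empty

def short_decode_alt (code_map : List (String × Int)) (short_mapping : List (String × String)) : List (String × Int) :=
  (code_map.foldl
    (fun d kv =>
      (((pvProfiles short_mapping).get? kv.1).getD PySem.Dict.empty).items.foldl
        (fun d pn => d.modify pn.1 0 (· + pn.2 * kv.2)) d)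
    PySem.Dict.empty).items

-- ===== PRECONDITION & SPEC =====
-- Pre_ excludes (a) the inputs where Python's short_mapping[k] / profiles[k] raises KeyError, and
-- (b) association lists with duplicate short_mapping keys, which represent no Python dict input
-- (short_mapping is a dict in Python, so its keys are necessarily distinct).
def Pre_short_decode (code_map : List (String × Int)) (short_mapping : List (String × String)) : Prop :=
  (∀ kv ∈ code_map, kv.1 ∈ short_mapping.map Prod.fst) ∧ (short_mapping.map Prod.fst).Nodup
instance (code_map : List (String × Int)) (short_mapping : List (String × String)) : Decidable (Pre_short_decode code_map short_mapping) := by unfold Pre_short_decode; infer_instance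

def pvWitness_short_decode : (List (String × Int)) × (List (String × String)) :=
  ([("<A", 1), ("A^", 3)], [("<A", ">>^"), ("A^", "")])

def Spec_short_decode (code_map : List (String × Int)) (short_mapping : List (String × String)) (out : List (String × Int)) : Prop := out = short_decode_alt code_map short_mapping
instance (code_map : List (String × Int)) (short_mapping : List (String × String)) (out : List (String × Int)) : Decidable (Spec_short_decode code_map short_mapping out) := by unfold Spec_short_decode; infer_instance

-- ===== CLAIM (what is proved, stated in full; the proofs are below) =====
def Claim_equal_short_decode : Prop := ∀ (code_map : List (String × Int)) (short_mapping : List (String × String)), Dom_short_decode code_map short_mapping → Pre_short_decode code_map short_mapping → Spec_short_decode code_map short_mapping (short_decode code_map short_mapping)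

-- ===== LEMMAS AND PROOFS =====

-- proof-side vocabulary: one weighted pair-count update, a run of them, the per-entry
-- contribution lists of the two ports, and the total weight of a key in such a list
def pvAdd (d : PySem.Dict String Int) (e : String × Int) : PySem.Dict String Int := d.modify e.1 0 (· + e.2)
def pvAddL (d : PySem.Dict String Int) (L : List (String × Int)) : PySem.Dict String Int := L.foldl pvAdd d
def pvContrib (e : String × Int) : List (String × Int) := (pvPairsOf e.1).map (fun p => (p, e.2))
def pvGroup (e : String × Int) : List (String × Int) :=
  (PySem.Set.ofList (pvPairsOf e.1)).map (fun q => (q, ((pvPairsOf e.1).count q : Int) * e.2))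
def pvW (L : List (String × Int)) (p : String) : Int := ((L.filter (fun e => e.1 == p)).map Prod.snd).sum

theorem pvInner_eq (s : String) (v : Int) (d : PySem.Dict String Int) :
    (pvPairsOf s).foldl (fun d p => d.modify p 0 (· + v)) d = pvAddL d (pvContrib (s, v)) := by
  simp [pvAddL, pvContrib, List.foldl_map, pvAdd]

theorem pvAddL_append (d : PySem.Dict String Int) (X Y : List (String × Int)) :
    pvAddL d (X ++ Y) = pvAddL (pvAddL d X) Y := by
  simp [pvAddL, List.foldl_append]

theorem pvAddL_flatMap (g : (String × Int) → List (String × Int)) (M : List (String × Int))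
    (d : PySem.Dict String Int) :
    pvAddL d (M.flatMap g) = M.foldl (fun d e => pvAddL d (g e)) d := by
  induction M generalizing d with
  | nil => rfl
  | cons e M ih => simp [List.flatMap_cons, pvAddL_append, ih]

theorem pvW_append (X Y : List (String × Int)) (p : String) :
    pvW (X ++ Y) p = pvW X p + pvW Y p := by
  simp [pvW, List.filter_append]

theorem pvW_cons (e : String × Int) (L : List (String × Int)) (p : String) :
    pvW (e :: L) p = (if e.1 == p then e.2 else 0) + pvW L p := by
  by_cases h : e.1 == p <;> simp [pvW, h]

theorem pvGetD_addL (L : List (String × Int)) (d : PySem.Dict String Int) (p : String) :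
    (pvAddL d L).getD p 0 = d.getD p 0 + pvW L p := by
  induction L generalizing d with
  | nil => simp [pvAddL, pvW]
  | cons e L ih =>
    have : pvAddL d (e :: L) = pvAddL (pvAdd d e) L := rfl
    rw [this, ih, pvW_cons, pvAdd, PySem.Dict.getD_modify]
    rcases eq_or_ne p e.1 with h | h
    · simp [h]
      ring
    · simp [h, Ne.symm h]

theorem pvKeys_addL (L : List (String × Int)) :
    (pvAddL PySem.Dict.empty L).keys = PySem.Set.ofList (L.map Prod.fst) := by
  have := PySem.Dict.keys_foldl_modify_key L (fun e => e.1) (0 : Int) (fun _ e => (· + e.2)) PySem.Dict.empty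
  simpa [pvAddL, pvAdd, PySem.Dict.keys_empty, PySem.Set.update_nil_left] using this

theorem pvItems_addL (L : List (String × Int)) :
    (pvAddL PySem.Dict.empty L).items
      = (PySem.Set.ofList (L.map Prod.fst)).map (fun p => (p, pvW L p)) := by
  have hnd : (pvAddL PySem.Dict.empty L).keys.Nodup := by
    rw [pvKeys_addL]; exact PySem.Set.nodup_ofList _
  rw [PySem.Dict.items_eq_map_keys _ hnd 0, pvKeys_addL]
  refine List.map_congr_left (fun k _ => ?_)
  rw [pvGetD_addL, PySem.Dict.getD_empty, zero_add]

-- ----- Set.update lemmas: deduping each chunk does not change the dedup of the flattened list -----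
theorem pvUpdate_absorb (s : List String) (xs : List String) (h : ∀ x ∈ xs, x ∈ s) :
    PySem.Set.update s xs = s := by
  induction xs generalizing s with
  | nil => simp [PySem.Set.update_nil]
  | cons a xs ih =>
    rw [PySem.Set.update_cons, PySem.Set.add_of_mem (h a (by simp))]
    exact ih s (fun x hx => h x (by simp [hx]))

theorem pvUpdate_update (X : List String) : ∀ (s t : List String), (∀ a ∈ t, a ∈ s) →
    PySem.Set.update s (PySem.Set.update t X) = PySem.Set.update s X := by
  induction X with
  | nil =>
    intro s t h
    rw [PySem.Set.update_nil, PySem.Set.update_nil, pvUpdate_absorb s t h]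
  | cons a X ih =>
    intro s t h
    rw [PySem.Set.update_cons s, PySem.Set.update_cons t]
    by_cases ha : a ∈ t
    · rw [PySem.Set.add_of_mem ha, PySem.Set.add_of_mem (h a ha)]
      exact ih s t h
    · rw [PySem.Set.add_of_not_mem ha]
      have hsub : ∀ x ∈ (t ++ [a]), x ∈ PySem.Set.add s a := by
        intro x hx
        rcases List.mem_append.1 hx with hx | hx
        · exact (PySem.Set.mem_add _ _ _).2 (Or.inl (h x hx))
        · simp only [List.mem_singleton] at hx
          exact (PySem.Set.mem_add _ _ _).2 (Or.inr hx)
      rw [← ih (PySem.Set.add s a) (t ++ [a]) hsub]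
      -- replace the base s by s.add a on the left, using that a occurs inside update (t++[a]) X
      rw [PySem.Set.update_eq_append_filter (t ++ [a]) X]
      rw [PySem.Set.update_append, PySem.Set.update_append, PySem.Set.update_append,
        pvUpdate_absorb s t h, PySem.Set.update_cons, PySem.Set.update_nil,
        pvUpdate_absorb (PySem.Set.add s a) (t ++ [a]) hsub]

theorem pvUpdate_flatMap_ofList {α : Type} (f : α → List String) (l : List α) :
    ∀ (s : List String),
      PySem.Set.update s (l.flatMap f) = PySem.Set.update s (l.flatMap (fun x => PySem.Set.ofList (f x))) := by
  induction l with
  | nil => intro s; rfl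
  | cons a l ih =>
    intro s
    rw [List.flatMap_cons, List.flatMap_cons, PySem.Set.update_append, PySem.Set.update_append, ih]
    have : PySem.Set.update s (PySem.Set.ofList (f a)) = PySem.Set.update s (f a) :=
      pvUpdate_update (f a) s [] (by intro x hx; simp at hx)
    rw [this]

theorem pvOfList_flatMap_ofList {α : Type} (f : α → List String) (l : List α) :
    PySem.Set.ofList (l.flatMap f) = PySem.Set.ofList (l.flatMap (fun x => PySem.Set.ofList (f x))) := by
  have := pvUpdate_flatMap_ofList f l []
  simpa [PySem.Set.update_nil_left] using this

-- ----- weight lemmas -----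
theorem pvW_contrib (s : String) (v : Int) (p : String) :
    pvW (pvContrib (s, v)) p = v * ((pvPairsOf s).count p : Int) := by
  unfold pvContrib
  induction pvPairsOf s with
  | nil => simp [pvW]
  | cons q ps ih =>
    rw [List.map_cons, pvW_cons, ih, List.count_cons]
    rcases eq_or_ne q p with h | h
    · subst h
      simp
      ring
    · simp [h]

theorem pvW_map_nodup (g : String → Int) (K : List String) (hnd : K.Nodup) (p : String) :
    pvW (K.map (fun q => (q, g q))) p = if p ∈ K then g p else 0 := by
  induction K with
  | nil => simp [pvW]
  | cons k K ih =>
    rw [List.map_cons, pvW_cons, ih (List.nodup_cons.1 hnd).2]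
    rcases eq_or_ne k p with h | h
    · subst h
      simp [(List.nodup_cons.1 hnd).1]
    · simp [h, Ne.symm h]

theorem pvW_group (e : String × Int) (p : String) :
    pvW (pvGroup e) p = pvW (pvContrib e) p := by
  rw [pvW_contrib e.1 e.2 p]
  unfold pvGroup
  rw [pvW_map_nodup _ _ (PySem.Set.nodup_ofList _) p]
  by_cases h : p ∈ PySem.Set.ofList (pvPairsOf e.1)
  · simp [h]
    ring
  · have : p ∉ pvPairsOf e.1 := fun hm => h ((PySem.Set.mem_ofList _ _).2 hm)
    simp [h, List.count_eq_zero.2 this]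

theorem pvW_flatMap_congr (g1 g2 : (String × Int) → List (String × Int)) (M : List (String × Int))
    (p : String) (h : ∀ e ∈ M, pvW (g1 e) p = pvW (g2 e) p) :
    pvW (M.flatMap g1) p = pvW (M.flatMap g2) p := by
  induction M with
  | nil => rfl
  | cons e M ih =>
    rw [List.flatMap_cons, List.flatMap_cons, pvW_append, pvW_append,
      h e (by simp), ih (fun x hx => h x (by simp [hx]))]

-- ----- the profiles dict of port B -----
theorem pvLookup_eq_none (k : String) (l : List (String × String)) (h : k ∉ l.map Prod.fst) :
    List.lookup k l = none := by
  induction l with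
  | nil => rfl
  | cons a l ih =>
    have hk : ¬ (k == a.1) = true := by
      simp only [beq_iff_eq]
      intro hkk; exact h (by simp [hkk])
    simp only [List.lookup, hk]
    exact ih (fun hm => h (by simp [hm]))

theorem pvLookup_mem (k : String) (l : List (String × String)) (h : k ∈ l.map Prod.fst) :
    ∃ s, List.lookup k l = some s := by
  induction l with
  | nil => simp at h
  | cons a l ih =>
    by_cases hk : k = a.1
    · exact ⟨a.2, by simp [List.lookup, hk]⟩
    · have hb : (k == a.1) = false := by simp [hk]
      simp only [List.lookup, hb]
      refine ih ?_
      rcases List.mem_map.1 h with ⟨e, he, rfl⟩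
      rcases List.mem_cons.1 he with rfl | he'
      · exact absurd rfl hk
      · exact List.mem_map_of_mem he'

theorem pvProfiles_get? (sm : List (String × String)) (hnd : (sm.map Prod.fst).Nodup)
    (k : String) : ∀ (pr : PySem.Dict String (PySem.Dict String Int)),
    (sm.foldl (fun pr kv => pr.insert kv.1 (pvProfile kv.2)) pr).get? k
      = match List.lookup k sm with
        | some s => some (pvProfile s)
        | none => pr.get? k := by
  induction sm with
  | nil => intro pr; rfl
  | cons a sm ih =>
    intro pr
    rw [List.map_cons] at hnd
    have hnd' := List.nodup_cons.1 hnd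
    rw [List.foldl_cons, ih hnd'.2 (pr.insert a.1 (pvProfile a.2))]
    by_cases hk : k = a.1
    · subst hk
      rw [pvLookup_eq_none a.1 sm hnd'.1]
      simp [List.lookup, PySem.Dict.get?_insert_self]
    · have : (k == a.1) = false := by simp [hk]
      simp only [List.lookup, this]
      cases List.lookup k sm with
      | some s => rfl
      | none => simp [PySem.Dict.get?_insert_of_ne _ _ hk]

theorem pvProfile_items (s : String) :
    (pvProfile s).items = (PySem.Set.ofList (pvPairsOf s)).map (fun q => (q, ((pvPairsOf s).count q : Int))) := by
  have : pvProfile s = PySem.Dict.counter (pvPairsOf s) := rfl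
  rw [this, PySem.Dict.items_counter]

-- ----- the two ports as characterised folds -----
theorem pvA_eq (code_map : List (String × Int)) (short_mapping : List (String × String)) :
    short_decode code_map short_mapping
      = (pvAddL PySem.Dict.empty
          ((code_map.map (fun kv => ((List.lookup kv.1 short_mapping).getD "", kv.2))).flatMap pvContrib)).items := by
  unfold short_decode
  rw [pvAddL_flatMap, List.foldl_map]
  congr 1
  apply List.foldl_ext
  intro d kv _
  exact pvInner_eq _ kv.2 d

theorem pvB_eq (code_map : List (String × Int)) (short_mapping : List (String × String))
    (hpre : Pre_short_decode code_map short_mapping) :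
    short_decode_alt code_map short_mapping
      = (pvAddL PySem.Dict.empty
          ((code_map.map (fun kv => ((List.lookup kv.1 short_mapping).getD "", kv.2))).flatMap pvGroup)).items := by
  unfold short_decode_alt
  rw [pvAddL_flatMap, List.foldl_map]
  congr 1
  apply PySem.List.foldl_congr_mem
  intro d kv hkv
  unfold pvProfiles
  -- resolve profiles[kv.1]
  obtain ⟨s, hs⟩ := pvLookup_mem kv.1 short_mapping (hpre.1 kv hkv)
  rw [pvProfiles_get? short_mapping hpre.2 kv.1 PySem.Dict.empty, hs]
  simp only [Option.getD_some]
  rw [pvProfile_items, List.foldl_map]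
  show _ = pvAddL d (pvGroup (s, kv.2))
  simp [pvGroup, pvAddL, List.foldl_map, pvAdd]

theorem pvMap_fst_flat (M : List (String × Int)) :
    (M.flatMap pvContrib).map Prod.fst = (M.map Prod.fst).flatMap pvPairsOf := by
  simp [pvContrib, List.map_flatMap, List.flatMap_map, List.map_map, Function.comp_def]

theorem pvMap_fst_flat_group (M : List (String × Int)) :
    (M.flatMap pvGroup).map Prod.fst
      = (M.map Prod.fst).flatMap (fun s => PySem.Set.ofList (pvPairsOf s)) := by
  simp [pvGroup, List.map_flatMap, List.flatMap_map, List.map_map, Function.comp_def]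

-- ===== VERDICT (by name: the statement is the Claim_ definition above) =====
theorem short_decode_spec : Claim_equal_short_decode := by
  intro code_map short_mapping _ hpre
  unfold Spec_short_decode
  rw [pvA_eq, pvB_eq code_map short_mapping hpre]
  set S := code_map.map (fun kv => ((List.lookup kv.1 short_mapping).getD "", kv.2)) with hS
  rw [pvItems_addL (S.flatMap pvContrib), pvItems_addL (S.flatMap pvGroup)]
  have hK : PySem.Set.ofList ((S.flatMap pvContrib).map Prod.fst)
      = PySem.Set.ofList ((S.flatMap pvGroup).map Prod.fst) := by
    rw [pvMap_fst_flat, pvMap_fst_flat_group]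
    exact pvOfList_flatMap_ofList pvPairsOf (S.map Prod.fst)
  have hW : ∀ p, pvW (S.flatMap pvContrib) p = pvW (S.flatMap pvGroup) p := by
    intro p
    exact pvW_flatMap_congr pvContrib pvGroup S p (fun e _ => (pvW_group e p).symm)
  rw [hK]
  exact List.map_congr_left (fun p _ => by rw [hW p])
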